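-- pv_equiv track=rewrite | github.com/plane11875/apidesign-uci-source | scripts/gen_uci_evp_wrappers.py | remove_preprocessor
-- ===== SOURCE A (Python) =====
-- def remove_preprocessor(text: str) -> str:
--     lines = []
--     skip_macro_body = False
--     for line in text.splitlines():
--         stripped = line.lstrip()
--         if stripped.startswith('#'):
--             skip_macro_body = line.rstrip().endswith('\\')
--             continue
--         if skip_macro_body:
--             if line.rstrip().endswith('\\'):
--                 continue
--             skip_macro_body = False
--             continue
--         lines.append(line)
--     return "\n".join(lines)
-- ===== SOURCE B (Python) =====
-- def remove_preprocessor(text: str) -> str: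
--     lines = text.splitlines()
--     out = []
--     i = 0
--     n = len(lines)
--     while i < n:
--         line = lines[i]
--         if line.lstrip().startswith('#'):
--             while i < n and lines[i].rstrip().endswith('\\'):
--                 i += 1
--             i += 1
--         else:
--             out.append(line)
--             i += 1
--     return "\n".join(out)
-- ===== Notes on version B (the rewrite author's own statement) =====
-- stated objective: alternative
-- what changed: Replaces A's skip_macro_body flag threaded across a flat for-loop with an index-based while loop whose inner while swallows a whole preprocessor directive plus its backslash-continuation lines as one group.
import Mathlib
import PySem

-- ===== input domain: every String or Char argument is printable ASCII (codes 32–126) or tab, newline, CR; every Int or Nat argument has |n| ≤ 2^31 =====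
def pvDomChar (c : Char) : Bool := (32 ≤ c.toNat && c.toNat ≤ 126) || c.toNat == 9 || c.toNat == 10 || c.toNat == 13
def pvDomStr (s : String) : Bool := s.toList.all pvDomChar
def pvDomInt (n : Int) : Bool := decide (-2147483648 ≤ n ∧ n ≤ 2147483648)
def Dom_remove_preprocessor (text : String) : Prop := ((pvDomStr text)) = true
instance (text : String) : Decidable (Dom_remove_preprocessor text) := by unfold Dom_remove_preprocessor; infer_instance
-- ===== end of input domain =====

-- B groups each '#' directive with its backslash-continuation lines and skips the whole
-- group at once (index-style loop), instead of A's skip-flag carried across iterations;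
-- objective: alternative decomposition, same cost. Equivalence proved on all inputs.

-- ===== PORT A =====
-- A's loop: flag skip_macro_body carried across lines, output list accumulated.
def pvALoop : List String → Bool → List String
  | [], _ => []
  | line :: rest, skip =>
    let stripped := PySem.Str.lstrip line
    if PySem.Str.startswith stripped "#" then
      pvALoop rest (PySem.Str.endswith (PySem.Str.rstrip line) "\\")
    else if skip then
      if PySem.Str.endswith (PySem.Str.rstrip line) "\\" then
        pvALoop rest true
      else
        pvALoop rest false
    else
      line :: pvALoop rest skip

def remove_preprocessor (text : String) : String :=
  PySem.Str.join "\n" (pvALoop (PySem.Str.splitlines text) false)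

-- ===== PORT B =====
-- inner while of B: starting at the directive line, drop lines while they end with '\',
-- then drop the terminating line too.
def pvSkipCont : List String → List String
  | [] => []
  | line :: rest =>
    if PySem.Str.endswith (PySem.Str.rstrip line) "\\" then pvSkipCont rest
    else rest

theorem pvSkipCont_length_le : ∀ (ls : List String), (pvSkipCont ls).length ≤ ls.length
  | [] => Nat.le_refl _
  | line :: rest => by
    unfold pvSkipCont
    split
    · exact Nat.le_succ_of_le (pvSkipCont_length_le rest)
    · exact Nat.le_succ _

-- outer while of B over the remaining lines
def pvBLoop : List String → List String
  | [] => []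
  | line :: rest =>
    if PySem.Str.startswith (PySem.Str.lstrip line) "#" then
      pvBLoop (pvSkipCont (line :: rest))
    else
      line :: pvBLoop rest
termination_by ls => ls.length
decreasing_by
  · simp only [pvSkipCont, *]
    split
    · exact Nat.lt_succ_of_le (pvSkipCont_length_le rest)
    · exact Nat.lt_succ_self _
  · exact Nat.lt_succ_self _

def remove_preprocessor_alt (text : String) : String :=
  PySem.Str.join "\n" (pvBLoop (PySem.Str.splitlines text))

-- ===== PRECONDITION & SPEC =====
def Spec_remove_preprocessor (text : String) (out : String) : Prop := out = remove_preprocessor_alt text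
instance (text : String) (out : String) : Decidable (Spec_remove_preprocessor text out) := by unfold Spec_remove_preprocessor; infer_instance

-- ===== CLAIM (what is proved, stated in full; the proofs are below) =====
def Claim_equal_remove_preprocessor : Prop := ∀ (text : String), Dom_remove_preprocessor text → Spec_remove_preprocessor text (remove_preprocessor text)

-- ===== LEMMAS AND PROOFS =====

-- Simultaneous invariant: with the flag clear the loops agree directly; with the flag
-- set, A behaves as B does after entering its skip-continuation phase.
theorem pvLoop_agree : ∀ (ls : List String),
    pvALoop ls false = pvBLoop ls ∧ pvALoop ls true = pvBLoop (pvSkipCont ls)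
  | [] => by constructor <;> simp [pvALoop, pvBLoop, pvSkipCont]
  | line :: rest => by
    obtain ⟨ihf, iht⟩ := pvLoop_agree rest
    by_cases h : PySem.Chars.startswith (PySem.Chars.lstrip line.toList) ['#'] = true <;>
      by_cases he : PySem.Chars.endswith (PySem.Chars.rstrip line.toList) ['\\'] = true <;>
        constructor <;>
          simp [pvALoop, pvBLoop, pvSkipCont, h, he, ihf, iht]

-- ===== VERDICT (by name: the statement is the Claim_ definition above) =====
theorem remove_preprocessor_spec : Claim_equal_remove_preprocessor := by
  intro text _
  unfold Spec_remove_preprocessor remove_preprocessor remove_preprocessor_alt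
  rw [(pvLoop_agree (PySem.Str.splitlines text)).1]
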